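-- pv_equiv track=rewrite | github.com/rudjtr234/tile_RAG | evaluation/result_json/clean_report.py | process_reports_by_directory
-- ===== SOURCE A (Python) =====
-- from collections import defaultdict, Counter
--
-- def extract_dirname(file_id):
--     # 예: PIT_01_05661_01_1792_0.tiff → PIT_01_05661_01
--     parts = file_id.replace(".tiff", "").split("_")
--     return "_".join(parts[:4])  # 디렉토리 단위까지만 유지
--
-- def process_reports_by_directory(data):
--     """
--     디렉토리별로 가장 많이 등장한 리포트를 대표로 뽑기
--     """
--     dir_to_reports = defaultdict(list)
--
--     # 각 디렉토리 단위로 리포트 수집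
--     for item in data:
--         dirname = extract_dirname(item["id"])
--         dir_to_reports[dirname].append(item["report"].strip())
--
--     # 대표 리포트 생성
--     result = []
--     for dirname, reports in dir_to_reports.items():
--         most_common = Counter(reports).most_common(1)[0][0]
--         result.append({
--             "id": f"{dirname}.tiff",  # 디렉토리 대표 이름으로 확장자 포함
--             "report": most_common
--         })
--
--     return result
-- ===== SOURCE B (Python) =====
-- def process_reports_by_directory(data):
--     """
--     Single streaming pass: per directory keep report->(count, first-seen rank) and a
--     running best (report, count, rank), replaced when the new count strictly exceeds
--     the best count or ties it with a smaller rank (= Counter.most_common's stable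
--     first-inserted-wins rule). No intermediate report lists, no Counter, no sort,
--     no post-loop scan.
--     """
--     state = {}  # dirname -> [counts, best]
--     for item in data:
--         dirname = "_".join(item["id"].replace(".tiff", "").split("_")[:4])
--         report = item["report"].strip()
--         st = state.get(dirname)
--         if st is None:
--             st = [{}, ("", 0, 0)]
--             state[dirname] = st
--         counts, best = st
--         cnt, rank = counts.get(report, (0, len(counts)))
--         cnt += 1
--         counts[report] = (cnt, rank)
--         if cnt > best[1] or (cnt == best[1] and rank < best[2]):
--             st[1] = (report, cnt, rank)
--     return [{"id": d + ".tiff", "report": st[1][0]} for d, st in state.items()]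
-- ===== Notes on version B (the rewrite author's own statement) =====
-- stated objective: alternative
-- what changed: Replaces A's staged pipeline (collect per-directory report lists, then build a Counter and stable-sort its items with most_common(1)) by a single streaming pass that keeps, per directory, report->(count, first-seen rank) and a running best (report, count, rank) updated online with a strict-greater / tie-breaks-by-smaller-rank rule; the output is emitted directly from the maintained bests, with no intermediate lists, no Counter and no sort.
-- outside the precondition, e.g. on process_reports_by_directory([{'id': 'a_b_c_d_0.tiff'}]): A raises KeyError, B raises KeyError
import Mathlib
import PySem

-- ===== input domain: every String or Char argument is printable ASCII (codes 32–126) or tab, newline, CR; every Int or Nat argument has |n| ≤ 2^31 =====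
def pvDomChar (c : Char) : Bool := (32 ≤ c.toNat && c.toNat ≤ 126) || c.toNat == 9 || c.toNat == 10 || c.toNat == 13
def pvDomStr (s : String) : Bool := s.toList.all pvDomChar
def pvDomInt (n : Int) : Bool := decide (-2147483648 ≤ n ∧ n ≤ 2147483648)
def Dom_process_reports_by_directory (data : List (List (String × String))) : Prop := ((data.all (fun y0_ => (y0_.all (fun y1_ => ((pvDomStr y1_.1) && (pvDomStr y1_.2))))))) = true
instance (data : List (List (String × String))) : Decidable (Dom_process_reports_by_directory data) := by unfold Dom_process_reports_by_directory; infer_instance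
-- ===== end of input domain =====

-- B replaces A's collect-lists / Counter / most_common(1)-sort pipeline by one streaming pass that
-- maintains per directory a running best (report, count, first-seen rank); return values proved equal.

-- ===== PORT A =====
-- module helper: extract_dirname
def extract_dirname (file_id : String) : String :=
  let parts := (PySem.Str.split? (PySem.Str.replace file_id ".tiff" "") "_").getD []  -- sep "_" ≠ "", split? is some
  PySem.Str.join "_" (PySem.List.slice parts none (some 4))  -- parts[:4]

def process_reports_by_directory (data : List (List (String × String))) : List (List (String × String)) :=
  -- for item in data: dir_to_reports[extract_dirname(item["id"])].append(item["report"].strip())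
  -- item["id"] / item["report"]: KeyError totalized with default "" (excluded by Pre_)
  let dir_to_reports : PySem.Dict String (List String) :=
    data.foldl (fun d item =>
      let dirname := extract_dirname ((PySem.Dict.mk item).getD "id" "")
      d.modify dirname [] (fun rs => rs ++ [PySem.Str.strip ((PySem.Dict.mk item).getD "report" "")])) PySem.Dict.empty
  -- for dirname, reports in dir_to_reports.items(): Counter(reports).most_common(1)[0][0]
  -- most_common = stable sort of the counter's items by count, descending; (1)[0][0] = head's key
  -- (headD-totalized; the default is never used: each collected reports list is nonempty)
  dir_to_reports.items.foldl (fun result p =>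
    let most_common := ((PySem.List.sorted (PySem.Dict.counter p.2).items (fun q => q.2) true).headD ("", 0)).1
    result ++ [[("id", p.1 ++ ".tiff"), ("report", most_common)]]) []

-- ===== PORT B =====
def process_reports_by_directory_alt (data : List (List (String × String))) : List (List (String × String)) :=
  -- one streaming pass; state: dirname -> (report -> (count, rank), best (report, count, rank))
  let state : PySem.Dict String ((PySem.Dict String (Int × Int)) × (String × Int × Int)) :=
    data.foldl (fun d item =>
      let parts := (PySem.Str.split? (PySem.Str.replace ((PySem.Dict.mk item).getD "id" "") ".tiff" "") "_").getD []
      let dirname := PySem.Str.join "_" (PySem.List.slice parts none (some 4))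
      let report := PySem.Str.strip ((PySem.Dict.mk item).getD "report" "")
      let st := d.getD dirname (PySem.Dict.empty, ("", 0, 0))
      let cr := st.1.getD report (0, (st.1.items.length : Int))  -- counts.get(report, (0, len(counts)))
      let cnt := cr.1 + 1
      let counts := st.1.insert report (cnt, cr.2)
      let best := if cnt > st.2.2.1 ∨ (cnt = st.2.2.1 ∧ cr.2 < st.2.2.2) then (report, cnt, cr.2) else st.2
      d.insert dirname (counts, best)) PySem.Dict.empty
  state.items.foldl (fun result p =>
    result ++ [[("id", p.1 ++ ".tiff"), ("report", p.2.2.1)]]) []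

-- ===== PRECONDITION & SPEC =====
-- Pre_ excludes items missing an "id" or "report" key (Python A raises KeyError there) and items
-- whose association list carries a duplicate key: a Python dict cannot represent such an item, so
-- the first-match assoc-list reading vs dict construction (last wins) is ambiguous on them.
def Pre_process_reports_by_directory (data : List (List (String × String))) : Prop :=
  ∀ item ∈ data, (item.map Prod.fst).Nodup ∧
    (item.map Prod.fst).contains "id" = true ∧ (item.map Prod.fst).contains "report" = true
instance (data : List (List (String × String))) : Decidable (Pre_process_reports_by_directory data) := by
  unfold Pre_process_reports_by_directory; infer_instance

def pvWitness_process_reports_by_directory : (List (List (String × String))) :=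
  [[("id", "PIT_01_05661_01_1792_0.tiff"), ("report", " some finding ")],
   [("id", "PIT_01_05661_01_1800_0.tiff"), ("report", "some finding")]]

def Spec_process_reports_by_directory (data : List (List (String × String))) (out : List (List (String × String))) : Prop := out = process_reports_by_directory_alt data
instance (data : List (List (String × String))) (out : List (List (String × String))) : Decidable (Spec_process_reports_by_directory data out) := by unfold Spec_process_reports_by_directory; infer_instance

-- ===== CLAIM (what is proved, stated in full; the proofs are below) =====
def Claim_equal_process_reports_by_directory : Prop := ∀ (data : List (List (String × String))), Dom_process_reports_by_directory data → Pre_process_reports_by_directory data → Spec_process_reports_by_directory data (process_reports_by_directory data)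

-- ===== LEMMAS AND PROOFS =====

-- ghost definitions used only by the proofs: B's per-report state update and its fold,
-- rank-annotated counter items, and the indexed strict-max scan
def scanEAux (b : String × Int × Int) (n : Int) : List (String × Int) → String × Int × Int
  | [] => b
  | q :: t => scanEAux (if q.2 > b.2.1 then (q.1, q.2, n) else b) (n + 1) t

def scanE (l : List (String × Int)) : String × Int × Int := scanEAux ("", 0, 0) 0 l

lemma scanEAux_append (b : String × Int × Int) (n : Int) (l1 l2 : List (String × Int)) :
    scanEAux b n (l1 ++ l2) = scanEAux (scanEAux b n l1) (n + l1.length) l2 := by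
  induction l1 generalizing b n with
  | nil => simp [scanEAux]
  | cons q t ih => simp [scanEAux, ih]; ring_nf

lemma scanEAux_idx (l : List (String × Int)) (b : String × Int × Int) (n : Int) :
    (scanEAux b n l).2.2 = b.2.2 ∨
      (n ≤ (scanEAux b n l).2.2 ∧ (scanEAux b n l).2.2 < n + l.length) := by
  induction l generalizing b n with
  | nil => left; rfl
  | cons q t ih =>
    simp only [scanEAux]
    by_cases hq : q.2 > b.2.1
    · rcases ih (if q.2 > b.2.1 then (q.1, q.2, n) else b) (n + 1) with h | ⟨h1, h2⟩
      · right
        rw [h, if_pos hq]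
        simp only [List.length_cons]
        push_cast
        omega
      · right; simp only [List.length_cons]; push_cast; omega
    · rcases ih (if q.2 > b.2.1 then (q.1, q.2, n) else b) (n + 1) with h | ⟨h1, h2⟩
      · left; rw [h, if_neg hq]
      · right; simp only [List.length_cons]; push_cast; omega

lemma scanE_update (l2 l1 : List (String × Int)) (r : String) (c : Int) :
    scanE (l1 ++ (r, c + 1) :: l2) =
      (if c + 1 > (scanE (l1 ++ (r, c) :: l2)).2.1 ∨
          (c + 1 = (scanE (l1 ++ (r, c) :: l2)).2.1 ∧
            (l1.length : Int) < (scanE (l1 ++ (r, c) :: l2)).2.2)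
       then (r, c + 1, (l1.length : Int)) else scanE (l1 ++ (r, c) :: l2)) := by
  induction l2 using List.reverseRecOn with
  | nil =>
    have hb := scanEAux_idx l1 ("", 0, 0) 0
    unfold scanE
    rw [scanEAux_append, scanEAux_append]
    set bt := scanEAux ("", 0, 0) 0 l1 with hbt
    have hidx : ¬ ((l1.length : Int) < bt.2.2) := by
      rcases hb with h | ⟨h1, h2⟩
      · rw [h]; simp
      · omega
    simp only [scanEAux, zero_add]
    split_ifs with h1 h2 h3 <;> simp_all <;> omega
  | append_singleton t2 x ih =>
    have e1 : l1 ++ (r, c + 1) :: (t2 ++ [x]) = (l1 ++ (r, c + 1) :: t2) ++ [x] := by simp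
    have e2 : l1 ++ (r, c) :: (t2 ++ [x]) = (l1 ++ (r, c) :: t2) ++ [x] := by simp
    unfold scanE at *
    rw [e1, e2, scanEAux_append ("", 0, 0) 0 (l1 ++ (r, c + 1) :: t2) [x],
        scanEAux_append ("", 0, 0) 0 (l1 ++ (r, c) :: t2) [x], ih]
    set bt := scanEAux ("", 0, 0) 0 (l1 ++ (r, c) :: t2) with hbt
    have hn : (0 : Int) + ((l1 ++ (r, c + 1) :: t2).length : Int)
        = 0 + ((l1 ++ (r, c) :: t2).length : Int) := by simp
    have hlen : ((l1.length : Int)) < 0 + ((l1 ++ (r, c) :: t2).length : Int) := by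
      simp only [List.length_append, List.length_cons]; push_cast; omega
    rw [hn]
    set n := (0 : Int) + ((l1 ++ (r, c) :: t2).length : Int) with hnn
    simp only [scanEAux]
    split_ifs <;> simp_all <;> omega

def addRanksFrom (n : Int) : List (String × Int) → List (String × (Int × Int))
  | [] => []
  | q :: t => (q.1, (q.2, n)) :: addRanksFrom (n + 1) t

lemma length_addRanksFrom (n : Int) (l : List (String × Int)) :
    (addRanksFrom n l).length = l.length := by
  induction l generalizing n with
  | nil => rfl
  | cons q t ih => simp [addRanksFrom, ih]

lemma keys_addRanksFrom (n : Int) (l : List (String × Int)) :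
    (addRanksFrom n l).map Prod.fst = l.map Prod.fst := by
  induction l generalizing n with
  | nil => rfl
  | cons q t ih => simp [addRanksFrom, ih]

lemma addRanksFrom_append (n : Int) (l1 l2 : List (String × Int)) :
    addRanksFrom n (l1 ++ l2) = addRanksFrom n l1 ++ addRanksFrom (n + l1.length) l2 := by
  induction l1 generalizing n with
  | nil => simp [addRanksFrom]
  | cons q t ih => simp [addRanksFrom, ih, add_assoc]; ring_nf

lemma scanEAux_fst_snd (l : List (String × Int)) (b : String × Int × Int) (b' : String × Int)
    (n : Int) (h1 : b.1 = b'.1) (h2 : b.2.1 = b'.2) :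
    (scanEAux b n l).1 = (l.foldl (fun b q => if q.2 > b.2 then q else b) b').1 ∧
      (scanEAux b n l).2.1 = (l.foldl (fun b q => if q.2 > b.2 then q else b) b').2 := by
  induction l generalizing b b' n with
  | nil => exact ⟨h1, h2⟩
  | cons q t ih =>
    simp only [scanEAux, List.foldl_cons]
    by_cases hq : q.2 > b.2.1
    · have hq' : q.2 > b'.2 := h2 ▸ hq
      exact ih _ _ _ (by simp [hq, hq']) (by simp [hq, hq'])
    · have hq' : ¬ q.2 > b'.2 := h2 ▸ hq
      exact ih _ _ _ (by simp [hq, hq', h1]) (by simp [hq', h2])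

def bStep (st : (PySem.Dict String (Int × Int)) × (String × Int × Int)) (report : String) :
    (PySem.Dict String (Int × Int)) × (String × Int × Int) :=
  let cr := st.1.getD report (0, (st.1.items.length : Int))
  let cnt := cr.1 + 1
  let counts := st.1.insert report (cnt, cr.2)
  let best := if cnt > st.2.2.1 ∨ (cnt = st.2.2.1 ∧ cr.2 < st.2.2.2) then (report, cnt, cr.2) else st.2
  (counts, best)

def Fb (rs : List String) : (PySem.Dict String (Int × Int)) × (String × Int × Int) :=
  rs.foldl bStep (PySem.Dict.empty, ("", 0, 0))

lemma get?_addRanks_none (n : Int) (l : List (String × Int)) (r : String)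
    (h : r ∉ l.map Prod.fst) :
    (PySem.Dict.mk (addRanksFrom n l)).get? r = none := by
  induction l generalizing n with
  | nil => rfl
  | cons q t ih =>
    simp only [List.map_cons, List.mem_cons] at h
    push_neg at h
    simp [addRanksFrom, PySem.Dict.get?_mk_cons, show (q.1 == r) = false by simp [Ne.symm h.1],
      ih _ h.2]

lemma get?_addRanks_found (n : Int) (l1 l2 : List (String × Int)) (r : String) (c : Int)
    (h : r ∉ l1.map Prod.fst) :
    (PySem.Dict.mk (addRanksFrom n (l1 ++ (r, c) :: l2))).get? r = some (c, n + l1.length) := by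
  induction l1 generalizing n with
  | nil => simp [addRanksFrom, PySem.Dict.get?_mk_cons]
  | cons q t ih =>
    simp only [List.map_cons, List.mem_cons] at h
    push_neg at h
    simp only [List.cons_append, addRanksFrom, PySem.Dict.get?_mk_cons,
      show (q.1 == r) = false by simp [Ne.symm h.1]]
    rw [ih _ h.2]
    simp; ring_nf

lemma map_if_eq_self {ν : Type} (l : List (String × ν)) (r : String) (z : String × ν)
    (h : r ∉ l.map Prod.fst) :
    l.map (fun p => if p.1 == r then z else p) = l := by
  induction l with
  | nil => rfl
  | cons q t ih =>
    simp only [List.map_cons, List.mem_cons] at h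
    push_neg at h
    rw [List.map_cons, if_neg (by simpa using Ne.symm h.1), ih h.2]

lemma Fb_inv (rs : List String) :
    (Fb rs).1 = PySem.Dict.mk (addRanksFrom 0 (PySem.Dict.counter rs).items) ∧
      (Fb rs).2 = scanE (PySem.Dict.counter rs).items := by
  induction rs using List.reverseRecOn with
  | nil => exact ⟨rfl, rfl⟩
  | append_singleton rs r ih =>
    obtain ⟨ih1, ih2⟩ := ih
    have hFb : Fb (rs ++ [r]) = bStep (Fb rs) r := by
      unfold Fb; rw [List.foldl_append]; rfl
    have hcnt : PySem.Dict.counter (rs ++ [r]) =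
        (PySem.Dict.counter rs).modify r 0 (· + 1) := PySem.Dict.counter_append_singleton rs r
    set C := PySem.Dict.counter rs with hC
    have hitems1 : (Fb rs).1.items = addRanksFrom 0 C.items := by rw [ih1]
    by_cases hc : C.contains r = true
    · -- r already counted: split C.items around r's (unique) entry
      have hnd : C.keys.Nodup := PySem.Dict.nodup_keys_counter rs
      obtain ⟨c, hgc⟩ : ∃ c, C.get? r = some c := by
        rw [PySem.Dict.contains_eq_isSome_get?] at hc
        cases hg : C.get? r with
        | none => rw [hg] at hc; simp at hc
        | some c => exact ⟨c, rfl⟩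
      have hmem : (r, c) ∈ C.items := PySem.Dict.mem_items_of_get?_eq_some C hgc
      obtain ⟨l1, l2, hsplit⟩ := List.append_of_mem hmem
      have hnd' : (l1.map Prod.fst ++ r :: l2.map Prod.fst).Nodup := by
        have : C.keys = l1.map Prod.fst ++ r :: l2.map Prod.fst := by
          simp only [PySem.Dict.keys, hsplit, List.map_append, List.map_cons]
        exact this ▸ hnd
      have hr1 : r ∉ l1.map Prod.fst := fun hmem1 =>
        (List.disjoint_of_nodup_append hnd') hmem1 (by simp)
      have hr2 : r ∉ l2.map Prod.fst :=
        (List.nodup_cons.mp (List.Nodup.of_append_right hnd')).1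
      have hget : (Fb rs).1.getD r (0, ((Fb rs).1.items.length : Int)) = (c, (l1.length : Int)) := by
        rw [PySem.Dict.getD_eq_get?_getD, ih1, hsplit, get?_addRanks_found 0 l1 l2 r c hr1]
        simp
      have hmod : (PySem.Dict.counter (rs ++ [r])).items = l1 ++ (r, c + 1) :: l2 := by
        rw [hcnt, PySem.Dict.modify, PySem.Dict.getD_of_get?_eq_some C 0 hgc,
          PySem.Dict.items_insert_of_contains C _ hc, hsplit]
        simp only [List.map_append, List.map_cons]
        rw [map_if_eq_self l1 r _ hr1, map_if_eq_self l2 r _ hr2]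
        simp
      have hcontains : (PySem.Dict.mk (addRanksFrom 0 C.items)).contains r = true := by
        rw [PySem.Dict.contains_eq_isSome_get?, hsplit, get?_addRanks_found 0 l1 l2 r c hr1]
        rfl
      constructor
      · apply PySem.Dict.ext
        rw [hFb]
        show ((Fb rs).1.insert r _).items = _
        rw [hget, ih1, PySem.Dict.items_insert_of_contains _ _ hcontains, hmod, hsplit,
          addRanksFrom_append, addRanksFrom_append]
        simp only [addRanksFrom, List.map_append, List.map_cons]
        rw [map_if_eq_self _ r _ (by rw [keys_addRanksFrom]; exact hr1),
            map_if_eq_self _ r _ (by rw [keys_addRanksFrom]; exact hr2)]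
        simp
      · rw [hFb]
        show (if _ then _ else _) = _
        rw [hget, ih2, hmod, hsplit, scanE_update]
    · -- r is new: appended at rank = current size
      have hc' : C.contains r = false := by simpa using hc
      have hgn : C.get? r = none := by
        rw [PySem.Dict.contains_eq_isSome_get?] at hc
        cases hg : C.get? r with
        | none => rfl
        | some c => rw [hg] at hc; simp at hc
      have hrk : r ∉ C.items.map Prod.fst :=
        (PySem.Dict.get?_eq_none_iff_not_mem_keys C r).mp hgn
      have hget : (Fb rs).1.getD r (0, ((Fb rs).1.items.length : Int)) =
          (0, (C.items.length : Int)) := by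
        rw [PySem.Dict.getD_eq_get?_getD, ih1, get?_addRanks_none 0 C.items r hrk]
        simp [length_addRanksFrom]
      have hmod : (PySem.Dict.counter (rs ++ [r])).items = C.items ++ [(r, 1)] := by
        rw [hcnt, PySem.Dict.modify, PySem.Dict.getD_of_not_contains C 0 hc',
          PySem.Dict.items_insert_of_not_contains C _ hc']
        norm_num
      have hcontains : (PySem.Dict.mk (addRanksFrom 0 C.items)).contains r = false := by
        rw [PySem.Dict.contains_eq_isSome_get?, get?_addRanks_none 0 C.items r hrk]
        rfl
      constructor
      · apply PySem.Dict.ext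
        rw [hFb]
        show ((Fb rs).1.insert r _).items = _
        rw [hget, ih1, PySem.Dict.items_insert_of_not_contains _ _ hcontains, hmod,
          addRanksFrom_append]
        simp [addRanksFrom]
      · rw [hFb]
        show (if _ then _ else _) = _
        rw [hget, ih2, hmod]
        unfold scanE
        rw [scanEAux_append ("", 0, 0) 0 C.items [(r, 1)]]
        have hb := scanEAux_idx C.items ("", 0, 0) 0
        set bt := scanEAux ("", 0, 0) 0 C.items with hbt
        simp only [scanEAux, zero_add]
        split_ifs <;> simp_all <;> omega

-- ===== dictionary-level correspondence between the two data folds =====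

-- first-match lookup commutes with mapping the values of an association list
lemma get?_map_val {β : Type} (F : List String → β) (l : List (String × List String)) (k : String) :
    (PySem.Dict.mk (l.map (fun p => (p.1, F p.2)))).get? k = ((PySem.Dict.mk l).get? k).map F := by
  induction l with
  | nil => rfl
  | cons p t ih =>
    obtain ⟨a, v⟩ := p
    by_cases h : (a == k) <;> simp [PySem.Dict.get?_mk_cons, h, ih]

lemma getD_corr {β : Type} (F : List String → β) (init : β) (hF : F [] = init)
    (d1 : PySem.Dict String (List String)) (d2 : PySem.Dict String β)
    (h : d2.items = d1.items.map (fun p => (p.1, F p.2))) (k : String) :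
    d2.getD k init = F (d1.getD k []) := by
  have h2 : d2 = PySem.Dict.mk (d1.items.map (fun p => (p.1, F p.2))) := by
    cases d2; simpa using h
  have h1 : d1 = PySem.Dict.mk d1.items := by cases d1; rfl
  rw [PySem.Dict.getD_eq_get?_getD, PySem.Dict.getD_eq_get?_getD, h2]
  rw [show (PySem.Dict.mk d1.items).get? k = d1.get? k from by rw [← h1]] at *
  rw [get?_map_val]
  cases d1.get? k <;> simp [hF]

lemma contains_corr {β : Type} (F : List String → β)
    (d1 : PySem.Dict String (List String)) (d2 : PySem.Dict String β)
    (h : d2.items = d1.items.map (fun p => (p.1, F p.2))) (k : String) :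
    d2.contains k = d1.contains k := by
  have h2 : d2 = PySem.Dict.mk (d1.items.map (fun p => (p.1, F p.2))) := by
    cases d2; simpa using h
  have h1 : d1 = PySem.Dict.mk d1.items := by cases d1; rfl
  rw [PySem.Dict.contains_eq_isSome_get?, PySem.Dict.contains_eq_isSome_get?, h2, get?_map_val, ← h1]
  cases d1.get? k <;> rfl

-- one update step preserves the correspondence between the two dictionaries
lemma insert_step {β : Type} (F : List String → β)
    (d1 : PySem.Dict String (List String)) (d2 : PySem.Dict String β)
    (h : d2.items = d1.items.map (fun p => (p.1, F p.2))) (k : String)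
    (v1 : List String) (v2 : β) (hv : v2 = F v1) :
    (d2.insert k v2).items = (d1.insert k v1).items.map (fun p => (p.1, F p.2)) := by
  rw [PySem.Dict.items_insert, PySem.Dict.items_insert, contains_corr F d1 d2 h, h]
  split_ifs with hc
  · rw [List.map_map, List.map_map]
    refine List.map_congr_left (fun p _ => ?_)
    by_cases hpk : p.1 = k <;> simp [hpk, hv]
  · simp [hv]

-- the main loop invariant: B's state dict is A's dict of report lists, value-wise Fb
lemma fold_corr (data : List (List (String × String)))
    (d1 : PySem.Dict String (List String))
    (d2 : PySem.Dict String ((PySem.Dict String (Int × Int)) × (String × Int × Int)))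
    (h : d2.items = d1.items.map (fun p => (p.1, Fb p.2))) :
    (data.foldl (fun d item =>
        let parts := (PySem.Str.split? (PySem.Str.replace ((PySem.Dict.mk item).getD "id" "") ".tiff" "") "_").getD []
        let dirname := PySem.Str.join "_" (PySem.List.slice parts none (some 4))
        let report := PySem.Str.strip ((PySem.Dict.mk item).getD "report" "")
        let st := d.getD dirname (PySem.Dict.empty, ("", 0, 0))
        let cr := st.1.getD report (0, (st.1.items.length : Int))
        let cnt := cr.1 + 1
        let counts := st.1.insert report (cnt, cr.2)
        let best := if cnt > st.2.2.1 ∨ (cnt = st.2.2.1 ∧ cr.2 < st.2.2.2) then (report, cnt, cr.2) else st.2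
        d.insert dirname (counts, best)) d2).items =
    (data.foldl (fun d item =>
        let dirname := extract_dirname ((PySem.Dict.mk item).getD "id" "")
        d.modify dirname [] (fun rs => rs ++ [PySem.Str.strip ((PySem.Dict.mk item).getD "report" "")])) d1).items.map
      (fun p => (p.1, Fb p.2)) := by
  induction data generalizing d1 d2 with
  | nil => simpa using h
  | cons item rest ih =>
    simp only [List.foldl_cons]
    apply ih
    have hg := getD_corr Fb (PySem.Dict.empty, ("", 0, 0)) rfl d1 d2 h
      (extract_dirname ((PySem.Dict.mk item).getD "id" ""))
    rw [PySem.Dict.modify]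
    apply insert_step _ _ _ h
    simp only [extract_dirname] at hg
    rw [show Fb ((d1.getD (extract_dirname ((PySem.Dict.mk item).getD "id" "")) []) ++
          [PySem.Str.strip ((PySem.Dict.mk item).getD "report" "")]) =
        bStep (Fb (d1.getD (extract_dirname ((PySem.Dict.mk item).getD "id" "")) []))
          (PySem.Str.strip ((PySem.Dict.mk item).getD "report" "")) from by
      unfold Fb; rw [List.foldl_append]; rfl]
    simp only [extract_dirname] at *
    rw [hg]
    rfl

-- head of the stable descending sort by count = left-to-right strict-max scan
lemma head_sorted_rev_eq_scan (l : List (String × Int)) (hpos : ∀ q ∈ l, 0 < q.2) :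
    (PySem.List.sorted l (fun q : String × Int => q.2) true).headD ("", 0) =
      l.foldl (fun b q => if q.2 > b.2 then q else b) ("", 0) := by
  induction l using List.reverseRecOn with
  | nil => rfl
  | append_singleton t x ih =>
    have hpt : ∀ q ∈ t, 0 < q.2 := fun q hq => hpos q (List.mem_append_left _ hq)
    have hx : 0 < x.2 := hpos x (by simp)
    rw [PySem.List.sorted_rev_eq_foldl_insertBy, List.foldl_append] at *
    simp only [List.foldl_cons, List.foldl_nil]
    cases hs : List.foldl (fun acc y => PySem.List.insertBy (fun a b => decide (b.2 < a.2)) y acc) [] t with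
    | nil =>
      have ht : t = [] := by
        have := (PySem.List.sorted_eq_nil_iff t (fun q : String × Int => q.2) true).mp
          (by rw [PySem.List.sorted_rev_eq_foldl_insertBy]; exact hs)
        exact this
      subst ht
      simp only [PySem.List.insertBy]
      simp [hx]
    | cons m tl =>
      have ihm : m = t.foldl (fun b q => if q.2 > b.2 then q else b) ("", 0) := by
        have := ih hpt
        rw [hs] at this
        simpa using this
      rw [PySem.List.insertBy]
      by_cases hc : m.2 < x.2 <;> simp [hc, ← ihm]

lemma counter_items_pos (rs : List String) :
    ∀ q ∈ (PySem.Dict.counter rs).items, 0 < q.2 := by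
  intro q hq
  rw [PySem.Dict.items_counter] at hq
  rcases List.mem_map.mp hq with ⟨k, hk, rfl⟩
  have : k ∈ rs := (PySem.Set.mem_ofList rs k).mp hk
  have : 0 < rs.count k := List.count_pos_iff.mpr this
  simpa using this

-- ===== VERDICT (by name: the statement is the Claim_ definition above) =====
theorem process_reports_by_directory_spec : Claim_equal_process_reports_by_directory := by
  intro data _ _
  unfold Spec_process_reports_by_directory process_reports_by_directory process_reports_by_directory_alt
  simp only []
  rw [fold_corr data PySem.Dict.empty PySem.Dict.empty rfl]
  rw [PySem.List.foldl_append_singleton_eq_map, PySem.List.foldl_append_singleton_eq_map,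
    List.map_map, List.nil_append, List.nil_append]
  refine List.map_congr_left (fun p _ => ?_)
  simp only [Function.comp]
  rw [head_sorted_rev_eq_scan (PySem.Dict.counter p.2).items (counter_items_pos p.2)]
  rw [(Fb_inv p.2).2]
  simp only [scanE]
  rw [(scanEAux_fst_snd (PySem.Dict.counter p.2).items ("", 0, 0) ("", 0) 0 rfl rfl).1]
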